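-- pv_equiv track=rewrite | github.com/yogan/advent-of-code | 2025/day-08-python/aoc.py | connectAll
-- ===== SOURCE A (Python) =====
-- def connectAll(nodes, edges):
--     components = []
--
--     for _, i, j in edges:
--         i_comp = [comp for comp in components if i in comp]
--         j_comp = [comp for comp in components if j in comp]
--         if not i_comp and not j_comp:
--             components.append(set([i, j]))
--         elif i_comp and j_comp:
--             if i_comp == j_comp:
--                 continue
--             components.remove(i_comp[0])
--             components.remove(j_comp[0])
--             components.append(i_comp[0] | j_comp[0])
--         elif i_comp:
--             i_comp[0].add(j)
--         elif j_comp: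
--             j_comp[0].add(i)
--
--         if len(components) == 1 and len(components[0]) == len(nodes):
--             return nodes[i], nodes[j]
-- ===== SOURCE B (Python) =====
-- def connectAll(nodes, edges):
--     label = {}       # node id -> component label
--     members = {}     # component label -> list of node ids (distinct)
--     for _, i, j in edges:
--         for v in (i, j):
--             if v not in label:
--                 label[v] = v
--                 members[v] = [v]
--         li, lj = label[i], label[j]
--         if li != lj:
--             if len(members[li]) < len(members[lj]):
--                 li, lj = lj, li
--             for v in members[lj]:
--                 label[v] = li
--             members[li].extend(members[lj])
--             del members[lj]
--         if len(members) == 1 and len(members[li]) == len(nodes):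
--             return nodes[i], nodes[j]
-- ===== Notes on version B (the rewrite author's own statement) =====
-- stated objective: alternative
-- what changed: A keeps a list of component sets and rescans the whole list for both endpoints of every edge, rebuilding the list on merges; B instead keeps two dictionaries (node -> component label, label -> member list) and merges smaller member lists into larger ones, so the per-edge component search disappears.
import Mathlib
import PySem

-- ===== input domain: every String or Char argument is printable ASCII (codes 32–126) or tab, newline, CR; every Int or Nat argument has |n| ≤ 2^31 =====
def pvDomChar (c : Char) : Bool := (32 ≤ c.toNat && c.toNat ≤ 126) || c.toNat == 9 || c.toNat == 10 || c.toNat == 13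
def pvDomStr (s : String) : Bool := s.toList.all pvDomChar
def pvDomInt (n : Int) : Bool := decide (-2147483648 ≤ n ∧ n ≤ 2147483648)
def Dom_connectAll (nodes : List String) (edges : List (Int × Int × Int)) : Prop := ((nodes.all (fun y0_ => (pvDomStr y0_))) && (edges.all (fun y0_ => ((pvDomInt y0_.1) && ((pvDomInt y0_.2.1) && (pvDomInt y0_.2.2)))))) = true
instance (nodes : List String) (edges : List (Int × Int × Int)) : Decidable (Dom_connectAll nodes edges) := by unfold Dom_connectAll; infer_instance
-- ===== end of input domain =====

-- B replaces A's per-edge scan over the whole component list by two dictionaries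
-- (node -> component label, label -> member list) merged smaller-into-larger;
-- equivalence of the RETURN value is proved on all inputs where A does not raise.

-- ===== PORT A =====

-- return nodes[i], nodes[j]  (Python indexing; none = IndexError, excluded by Pre_)
def pvRetPair (nodes : List String) (i j : Int) : Option (String × String) :=
  match PySem.List.pyGet? nodes i, PySem.List.pyGet? nodes j with
  | some a, some b => some (a, b)
  | _, _ => none

-- Python list equality on lists of sets: same length, elementwise set ==
def pvSetEqList (xs ys : List (PySem.Set Int)) : Bool :=
  xs.length == ys.length && (xs.zip ys).all fun p => PySem.Set.equal p.1 p.2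

-- components.remove(c): drop the first element that is set-equal to c (c is a member here, so no ValueError)
def pvRemoveSet (comps : List (PySem.Set Int)) (c : PySem.Set Int) : List (PySem.Set Int) :=
  comps.eraseP (fun d => PySem.Set.equal d c)

-- i_comp[0].add(j): the first component containing x is mutated in place
def pvAddToFirst (comps : List (PySem.Set Int)) (x y : Int) : List (PySem.Set Int) :=
  match comps with
  | [] => []
  | c :: cs => if PySem.Set.contains c x then PySem.Set.add c y :: cs else c :: pvAddToFirst cs x y

-- body of A's for-loop (the four if/elif branches)
def pvStepA (comps : List (PySem.Set Int)) (i j : Int) : List (PySem.Set Int) :=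
  let iC := comps.filter (fun c => PySem.Set.contains c i)
  let jC := comps.filter (fun c => PySem.Set.contains c j)
  if iC.isEmpty && jC.isEmpty then comps ++ [PySem.Set.ofList [i, j]]
  else if !iC.isEmpty && !jC.isEmpty then
    if pvSetEqList iC jC then comps
    else
      match iC.head?, jC.head? with
      | some ci, some cj => pvRemoveSet (pvRemoveSet comps ci) cj ++ [PySem.Set.union ci cj]
      | _, _ => comps
  else if !iC.isEmpty then pvAddToFirst comps i j
  else pvAddToFirst comps j i

-- len(components) == 1 and len(components[0]) == len(nodes)
def pvCondA (nodes : List String) (comps : List (PySem.Set Int)) : Bool :=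
  comps.length == 1 && (comps.headD []).length == nodes.length

def pvGoA (nodes : List String) (comps : List (PySem.Set Int)) :
    List (Int × Int × Int) → Option (String × String)
  | [] => none
  | (_, i, j) :: rest =>
    let comps' := pvStepA comps i j
    if pvCondA nodes comps' then pvRetPair nodes i j
    else pvGoA nodes comps' rest

def connectAll (nodes : List String) (edges : List (Int × Int × Int)) : Option (String × String) :=
  pvGoA nodes [] edges

-- ===== PORT B =====

-- if v not in label: label[v] = v; members[v] = [v]
def pvSeen (lab : PySem.Dict Int Int) (mem : PySem.Dict Int (List Int)) (v : Int) :
    PySem.Dict Int Int × PySem.Dict Int (List Int) :=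
  if lab.contains v then (lab, mem) else (lab.insert v v, mem.insert v [v])

-- body of B's for-loop; returns (label, members, final li)
def pvStepB (lab : PySem.Dict Int Int) (mem : PySem.Dict Int (List Int)) (i j : Int) :
    PySem.Dict Int Int × PySem.Dict Int (List Int) × Int :=
  let st1 := pvSeen lab mem i
  let st2 := pvSeen st1.1 st1.2 j
  let lab := st2.1
  let mem := st2.2
  let li := lab.getD i 0
  let lj := lab.getD j 0
  if li == lj then (lab, mem, li)
  else
    let p := if (mem.getD li []).length < (mem.getD lj []).length then (lj, li) else (li, lj)
    let mj := mem.getD p.2 []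
    (mj.foldl (fun d v => d.insert v p.1) lab,
     (mem.modify p.1 [] (fun xs => xs ++ mj)).erase p.2, p.1)

-- len(members) == 1 and len(members[li]) == len(nodes)
def pvCondB (nodes : List String) (mem : PySem.Dict Int (List Int)) (lf : Int) : Bool :=
  mem.size == 1 && (mem.getD lf []).length == nodes.length

def pvGoB (nodes : List String) (lab : PySem.Dict Int Int) (mem : PySem.Dict Int (List Int)) :
    List (Int × Int × Int) → Option (String × String)
  | [] => none
  | (_, i, j) :: rest =>
    let st := pvStepB lab mem i j
    if pvCondB nodes st.2.1 st.2.2 then pvRetPair nodes i j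
    else pvGoB nodes st.1 st.2.1 rest

def connectAll_alt (nodes : List String) (edges : List (Int × Int × Int)) : Option (String × String) :=
  pvGoB nodes PySem.Dict.empty PySem.Dict.empty edges

-- ===== PRECONDITION & SPEC =====

-- the distinct endpoints appearing in the first k+1 edges
def pvPts (edges : List (Int × Int × Int)) (k : Nat) : PySem.Set Int :=
  PySem.Set.ofList ((edges.take (k + 1)).flatMap (fun e => [e.2.1, e.2.2]))

-- one breadth step of graph reachability over a list of edges
def pvExpand (es : List (Int × Int × Int)) (r : PySem.Set Int) : PySem.Set Int :=
  es.foldl (fun r e =>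
    let r1 := if PySem.Set.contains r e.2.1 then PySem.Set.add r e.2.2 else r
    if PySem.Set.contains r1 e.2.2 then PySem.Set.add r1 e.2.1 else r1) r

def pvClosure (es : List (Int × Int × Int)) (r : PySem.Set Int) : Nat → PySem.Set Int
  | 0 => r
  | n + 1 => pvClosure es (pvExpand es r) n

-- A's stop condition at edge k, as a graph property of the input: the graph formed by
-- edges[0..k] is connected (reachability closure from the first edge's endpoint covers all
-- endpoints) and has exactly len(nodes) distinct endpoints
def pvStop (nodes : List String) (edges : List (Int × Int × Int)) (k : Nat) : Bool :=
  let pts := pvPts edges k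
  pts.length == nodes.length &&
    (pvClosure (edges.take (k + 1))
        (PySem.Set.ofList [(edges.headD (0, 0, 0)).2.1]) pts.length).length == pts.length

-- A can raise only IndexError, at its return statement `return nodes[i], nodes[j]`, which is
-- reached exactly at the FIRST edge k whose prefix graph is connected with len(nodes) distinct
-- endpoints. Pre_ requires the endpoints of that one edge (if it exists) to be valid Python
-- indices into nodes; every input on which A returns a value satisfies Pre_.
def Pre_connectAll (nodes : List String) (edges : List (Int × Int × Int)) : Prop :=
  ∀ k ∈ List.range edges.length,
    (pvStop nodes edges k = true ∧ ∀ k' < k, pvStop nodes edges k' = false) →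
    (-(nodes.length : Int) ≤ (edges.getD k (0, 0, 0)).2.1 ∧
      (edges.getD k (0, 0, 0)).2.1 < nodes.length ∧
      -(nodes.length : Int) ≤ (edges.getD k (0, 0, 0)).2.2 ∧
      (edges.getD k (0, 0, 0)).2.2 < nodes.length)
instance (nodes : List String) (edges : List (Int × Int × Int)) : Decidable (Pre_connectAll nodes edges) := by unfold Pre_connectAll; infer_instance

def pvWitness_connectAll : List String × (List (Int × Int × Int)) :=
  (["a", "b"], [(7, 0, 1)])

def Spec_connectAll (nodes : List String) (edges : List (Int × Int × Int)) (out : Option (String × String)) : Prop := out = connectAll_alt nodes edges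
instance (nodes : List String) (edges : List (Int × Int × Int)) (out : Option (String × String)) : Decidable (Spec_connectAll nodes edges out) := by unfold Spec_connectAll; infer_instance

-- ===== CLAIM (what is proved, stated in full; the proofs are below) =====
def Claim_equal_connectAll : Prop := ∀ (nodes : List String) (edges : List (Int × Int × Int)), Dom_connectAll nodes edges → Pre_connectAll nodes edges → Spec_connectAll nodes edges (connectAll nodes edges)

-- ===== LEMMAS AND PROOFS =====

-- ---- generic PySem.Dict facts (assoc-list level; not in the PySem lemma book) ----

theorem pvGet?_erase {ν : Type} (d : PySem.Dict Int ν) (k k' : Int) :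
    (d.erase k).get? k' = if k' = k then none else d.get? k' := by
  obtain ⟨l⟩ := d
  simp only [PySem.Dict.erase, PySem.Dict.get?]
  induction l with
  | nil => simp
  | cons p t ih =>
    by_cases h1 : p.1 = k
    · rw [List.filter_cons_of_neg (by simp [h1])]
      by_cases h2 : k' = k
      · simp only [h2] at ih ⊢
        exact ih
      · rw [List.find?_cons_of_neg (by simp [h1]; omega)]
        simpa [h2] using ih
    · rw [List.filter_cons_of_pos (by simp [h1])]
      by_cases h2 : p.1 = k'
      · rw [List.find?_cons_of_pos (by simp [h2]), List.find?_cons_of_pos (by simp [h2])]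
        have : ¬ k' = k := by omega
        simp [this]
      · rw [List.find?_cons_of_neg (by simp [h2]), List.find?_cons_of_neg (by simp [h2])]
        exact ih

theorem pvContains_erase {ν : Type} (d : PySem.Dict Int ν) (k k' : Int) (h : k' ≠ k) :
    (d.erase k).contains k' = d.contains k' := by
  rw [PySem.Dict.contains_eq_isSome_get?, PySem.Dict.contains_eq_isSome_get?, pvGet?_erase]
  simp [h]

theorem pvGet?_foldl_insert (ms : List Int) (K : Int) (lab : PySem.Dict Int Int) (x : Int) :
    (ms.foldl (fun d v => d.insert v K) lab).get? x = if x ∈ ms then some K else lab.get? x := by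
  induction ms generalizing lab with
  | nil => simp
  | cons v t ih =>
    simp only [List.foldl_cons, ih, List.mem_cons]
    by_cases hx : x ∈ t
    · simp [hx]
    · by_cases hv : x = v <;> simp [hx, hv, PySem.Dict.get?_insert]

theorem pvKeysNodup_erase {ν : Type} (d : PySem.Dict Int ν) (k : Int) (h : d.keys.Nodup) :
    (d.erase k).keys.Nodup := by
  obtain ⟨l⟩ := d
  simp only [PySem.Dict.erase, PySem.Dict.keys] at *
  exact List.Nodup.sublist (List.filter_sublist.map Prod.fst) h

theorem pvFindFilterPerm {ν : Type} (l : List (Int × ν)) (k : Int) (m : ν)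
    (hnd : (l.map Prod.fst).Nodup)
    (hm : (l.find? (fun p => p.1 == k)).map (fun x => x.2) = some m) :
    (l.map (fun x => x.2)).Perm (m :: (l.filter (fun p => !p.1 == k)).map (fun x => x.2)) := by
  induction l with
  | nil => simp at hm
  | cons p t ih =>
    simp only [List.map_cons, List.nodup_cons] at hnd
    by_cases h1 : p.1 = k
    · rw [List.find?_cons_of_pos (by simp [h1])] at hm
      simp only [Option.map_some, Option.some.injEq] at hm
      rw [List.filter_cons_of_neg (by simp [h1])]
      have hfilter : t.filter (fun q => !q.1 == k) = t := by
        apply List.filter_eq_self.mpr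
        intro q hq
        have : q.1 ≠ k := by
          intro hqk
          exact hnd.1 (h1 ▸ hqk ▸ List.mem_map_of_mem hq)
        simp [this]
      rw [hfilter, List.map_cons, hm]
    · rw [List.find?_cons_of_neg (by simp [h1])] at hm
      rw [List.filter_cons_of_pos (by simp [h1])]
      simp only [List.map_cons]
      exact ((ih hnd.2 hm).cons p.2).trans (List.Perm.swap _ _ _)

theorem pvValues_perm {ν : Type} (d : PySem.Dict Int ν) (k : Int) (m : ν)
    (h : d.keys.Nodup) (hm : d.get? k = some m) :
    d.values.Perm (m :: (d.erase k).values) := by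
  obtain ⟨l⟩ := d
  simp only [PySem.Dict.get?, PySem.Dict.erase, PySem.Dict.values, PySem.Dict.keys] at *
  exact pvFindFilterPerm l k m h hm

theorem pvFilterMapOverwrite {ν : Type} (t : List (Int × ν)) (k : Int) (v : ν) :
    (t.map (fun p => if (p.1 == k) = true then (k, v) else p)).filter (fun p => !p.1 == k)
      = t.filter (fun p => !p.1 == k) := by
  induction t with
  | nil => rfl
  | cons p t ih =>
    by_cases h1 : p.1 = k
    · rw [List.map_cons, if_pos (by simp [h1]), List.filter_cons_of_neg (by simp),
          List.filter_cons_of_neg (by simp [h1])]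
      exact ih
    · rw [List.map_cons, if_neg (by simp [h1]), List.filter_cons_of_pos (by simp [h1]),
          List.filter_cons_of_pos (by simp [h1]), ih]

theorem pvFilterMapComm {ν : Type} (t : List (Int × ν)) (k k' : Int) (v : ν) (h : k ≠ k') :
    (t.map (fun p => if (p.1 == k) = true then (k, v) else p)).filter (fun p => !p.1 == k')
      = (t.filter (fun p => !p.1 == k')).map (fun p => if (p.1 == k) = true then (k, v) else p) := by
  induction t with
  | nil => rfl
  | cons p t ih =>
    by_cases h1 : p.1 = k'
    · have h2 : ¬ p.1 = k := by omega
      rw [List.map_cons, if_neg (by simp [h2]), List.filter_cons_of_neg (by simp [h1]),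
          List.filter_cons_of_neg (by simp [h1])]
      exact ih
    · by_cases h2 : p.1 = k
      · rw [List.map_cons, if_pos (by simp [h2]), List.filter_cons_of_pos (by simp [h]),
            List.filter_cons_of_pos (by simp [h1]), List.map_cons, if_pos (by simp [h2]), ih]
      · rw [List.map_cons, if_neg (by simp [h2]), List.filter_cons_of_pos (by simp [h1]),
            List.filter_cons_of_pos (by simp [h1]), List.map_cons, if_neg (by simp [h2]), ih]

theorem pvErase_insert_self {ν : Type} (d : PySem.Dict Int ν) (k : Int) (v : ν) :
    (d.insert k v).erase k = d.erase k := by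
  obtain ⟨l⟩ := d
  simp only [PySem.Dict.insert, PySem.Dict.erase, PySem.Dict.contains]
  split
  · congr 1
    exact pvFilterMapOverwrite l k v
  · congr 1
    simp [List.filter_append]

theorem pvErase_insert_ne {ν : Type} (d : PySem.Dict Int ν) (k k' : Int) (v : ν) (h : k ≠ k') :
    (d.insert k v).erase k' = (d.erase k').insert k v := by
  obtain ⟨l⟩ := d
  have hc : (PySem.Dict.mk (l.filter (fun p => !p.1 == k'))).contains k
      = (PySem.Dict.mk l).contains k := pvContains_erase _ _ _ h
  simp only [PySem.Dict.insert, PySem.Dict.erase] at hc ⊢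
  rw [hc]
  split
  · congr 1
    exact pvFilterMapComm l k k' v h
  · congr 1
    simp [List.filter_append, h]

theorem pvMem_values_of_get? {ν : Type} (d : PySem.Dict Int ν) (k : Int) (m : ν)
    (hm : d.get? k = some m) : m ∈ d.values := by
  obtain ⟨l⟩ := d
  simp only [PySem.Dict.get?, PySem.Dict.values] at *
  obtain ⟨p, hp, hp2⟩ := Option.map_eq_some_iff.mp hm
  exact hp2 ▸ List.mem_map_of_mem (List.mem_of_find?_eq_some hp)

theorem pvGet?_of_mem_values {ν : Type} (d : PySem.Dict Int ν) (m : ν)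
    (h : d.keys.Nodup) (hm : m ∈ d.values) : ∃ k, d.get? k = some m := by
  obtain ⟨p, hp, hp2⟩ := List.mem_map.mp hm
  exact ⟨p.1, by
    rw [PySem.Dict.get?_eq_some_iff_mem_items _ _ _ h]
    exact hp2 ▸ (by simpa using hp)⟩

theorem pvSize_eq_values_length {ν : Type} (d : PySem.Dict Int ν) :
    d.size = d.values.length := by
  simp [PySem.Dict.size, PySem.Dict.values]

-- multiset views of the two states
def pvM (comps : List (List Int)) : Multiset (Multiset Int) :=
  Multiset.ofList (comps.map (fun c => Multiset.ofList c))

def pvMV (mem : PySem.Dict Int (List Int)) : Multiset (Multiset Int) :=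
  Multiset.ofList (mem.values.map (fun m => Multiset.ofList m))

-- the simulation invariant between A's component list and B's two dictionaries
structure pvInv (comps : List (PySem.Set Int)) (lab : PySem.Dict Int Int)
    (mem : PySem.Dict Int (List Int)) : Prop where
  nonempty : ∀ c ∈ comps, c ≠ ([] : List Int)
  nodupC : ∀ c ∈ comps, c.Nodup
  disj : comps.Pairwise (fun a b => ∀ x ∈ a, x ∉ b)
  keysN : mem.keys.Nodup
  labmem : ∀ v l, lab.get? v = some l ↔ ∃ m, mem.get? l = some m ∧ v ∈ m
  keeper : ∀ l m, mem.get? l = some m → l ∈ m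
  perm : pvM comps = pvMV mem

theorem pvM_cons (c : List Int) (comps : List (List Int)) :
    pvM (c :: comps) = Multiset.ofList c ::ₘ pvM comps := by
  simp [pvM]

theorem pvM_eq_of_perm {comps1 comps2 : List (List Int)} (h : comps1.Perm comps2) :
    pvM comps1 = pvM comps2 := by
  unfold pvM
  exact Multiset.coe_eq_coe.mpr (h.map _)

theorem pvMem_pvM {comps : List (List Int)} {A : Multiset Int} :
    A ∈ pvM comps ↔ ∃ c ∈ comps, (↑c : Multiset Int) = A := by
  unfold pvM
  exact Multiset.mem_coe.trans List.mem_map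

-- pvInv only depends on the component list through its multiset of element multisets
theorem pvInv_congr {comps1 comps2 : List (List Int)} {lab : PySem.Dict Int Int}
    {mem : PySem.Dict Int (List Int)} (h12 : pvM comps1 = pvM comps2)
    (h : pvInv comps1 lab mem) : pvInv comps2 lab mem := by
  have hpick : ∀ c ∈ comps2, ∃ c1 ∈ comps1, (↑c1 : Multiset Int) = (↑c : Multiset Int) := by
    intro c hc
    exact pvMem_pvM.mp (h12 ▸ pvMem_pvM.mpr ⟨c, hc, rfl⟩)
  refine ⟨?_, ?_, ?_, h.keysN, h.labmem, h.keeper, h12 ▸ h.perm⟩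
  · intro c hc hcnil
    obtain ⟨c1, hc1, he⟩ := hpick c hc
    subst hcnil
    exact h.nonempty c1 hc1 (by simpa using he)
  · intro c hc
    obtain ⟨c1, hc1, he⟩ := hpick c hc
    have : (↑c : Multiset Int).Nodup := he ▸ (by simpa using h.nodupC c1 hc1)
    simpa using this
  · have hsym : Symmetric (fun (A B : Multiset Int) => ∀ x ∈ A, x ∉ B) := by
      intro A B hAB x hxB hxA
      exact hAB x hxA hxB
    have h1 : List.Pairwise (fun (A B : Multiset Int) => ∀ x ∈ A, x ∉ B)
        (comps1.map (fun c => Multiset.ofList c)) := by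
      refine List.pairwise_map.mpr (h.disj.imp_of_mem ?_)
      intro a b _ _ hab x hxa hxb
      exact hab x (by simpa using hxa) (by simpa using hxb)
    have h2 : Multiset.Pairwise (fun (A B : Multiset Int) => ∀ x ∈ A, x ∉ B) (pvM comps1) := by
      unfold pvM
      exact (Multiset.pairwise_coe_iff_pairwise hsym).mpr h1
    rw [h12] at h2
    unfold pvM at h2
    have h3 := List.pairwise_map.mp ((Multiset.pairwise_coe_iff_pairwise hsym).mp h2)
    refine h3.imp_of_mem ?_
    intro a b _ _ hab x hxa hxb
    exact hab x (by simpa using hxa) (by simpa using hxb)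

-- every dictionary part corresponds to a component with the same elements, and back
theorem pvPartToComp {comps lab mem} (h : pvInv comps lab mem) {l : Int} {m : List Int}
    (hm : mem.get? l = some m) : ∃ c ∈ comps, (↑c : Multiset Int) = (↑m : Multiset Int) := by
  refine pvMem_pvM.mp ?_
  rw [h.perm]
  unfold pvMV
  rw [Multiset.mem_coe, List.mem_map]
  exact ⟨m, pvMem_values_of_get? _ _ _ hm, rfl⟩

theorem pvCompToPart {comps lab mem} (h : pvInv comps lab mem) {c : List Int}
    (hc : c ∈ comps) : ∃ l m, mem.get? l = some m ∧ (↑c : Multiset Int) = (↑m : Multiset Int) := by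
  have hmm : (↑c : Multiset Int) ∈ pvMV mem := by
    rw [← h.perm]; exact pvMem_pvM.mpr ⟨c, hc, rfl⟩
  unfold pvMV at hmm
  rw [Multiset.mem_coe, List.mem_map] at hmm
  obtain ⟨m, hmv, hme⟩ := hmm
  obtain ⟨k, hk⟩ := pvGet?_of_mem_values _ _ h.keysN hmv
  exact ⟨k, m, hk, hme.symm⟩

theorem pvBUniq {comps lab mem} (h : pvInv comps lab mem) {l1 l2 : Int} {m1 m2 : List Int}
    {x : Int} (h1 : mem.get? l1 = some m1) (h2 : mem.get? l2 = some m2)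
    (hx1 : x ∈ m1) (hx2 : x ∈ m2) : l1 = l2 := by
  have a1 := (h.labmem x l1).mpr ⟨m1, h1, hx1⟩
  have a2 := (h.labmem x l2).mpr ⟨m2, h2, hx2⟩
  rw [a1] at a2
  exact (Option.some.injEq _ _ ▸ a2 : l1 = l2)

theorem pvUniq {comps lab mem} (h : pvInv comps lab mem) {c1 c2 : List Int} {x : Int}
    (hc1 : c1 ∈ comps) (hc2 : c2 ∈ comps) (hx1 : x ∈ c1) (hx2 : x ∈ c2) : c1 = c2 := by
  by_contra hne
  have hsym : Symmetric (fun (a b : List Int) => ∀ x ∈ a, x ∉ b) := by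
    intro a b hab x hxb hxa
    exact hab x hxa hxb
  exact (List.Pairwise.forall hsym h.disj hc1 hc2 hne) x hx1 hx2

theorem pvCompsNodup {comps lab mem} (h : pvInv comps lab mem) : comps.Nodup := by
  refine List.Pairwise.imp_of_mem ?_ h.disj
  intro a b ha _ hab hEq
  obtain ⟨x, hx⟩ := List.exists_mem_of_ne_nil a (h.nonempty a ha)
  exact hab x hx (hEq ▸ hx)

theorem pvUnseenNotMem {comps lab mem} (h : pvInv comps lab mem) {v : Int}
    (hv : lab.get? v = none) {c : List Int} (hc : c ∈ comps) : v ∉ c := by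
  intro hvc
  obtain ⟨l, m, hm, hcm⟩ := pvCompToPart h hc
  have hvm : v ∈ m := by
    have : (v : Int) ∈ (↑c : Multiset Int) := by simpa using hvc
    rw [hcm] at this
    simpa using this
  have := (h.labmem v l).mpr ⟨m, hm, hvm⟩
  rw [hv] at this
  cases this

theorem pvFilterSingleton {P : List Int → Bool} {comps : List (List Int)} {a : List Int}
    (hnd : comps.Nodup) (ha : a ∈ comps) (hPa : P a = true)
    (hu : ∀ b ∈ comps, P b = true → b = a) : comps.filter P = [a] := by
  induction comps with
  | nil => cases ha
  | cons c t ih =>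
    rw [List.nodup_cons] at hnd
    by_cases hc : P c = true
    · have hca : c = a := hu c (List.mem_cons_self) hc
      subst hca
      rw [List.filter_cons_of_pos hc]
      have : t.filter P = [] := by
        rw [List.filter_eq_nil_iff]
        intro b hb hPb
        exact hnd.1 ((hu b (List.mem_cons_of_mem _ hb) hPb) ▸ hb)
      rw [this]
    · have hat : a ∈ t := by
        cases List.mem_cons.mp ha with
        | inl he => exact absurd (he ▸ hPa) hc
        | inr ht => exact ht
      rw [List.filter_cons_of_neg (by simpa using hc)]
      exact ih hnd.2 hat (fun b hb hPb => hu b (List.mem_cons_of_mem _ hb) hPb)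

theorem pvUnseenFilter {comps lab mem} (h : pvInv comps lab mem) {v : Int}
    (hv : lab.get? v = none) : comps.filter (fun c => PySem.Set.contains c v) = [] := by
  rw [List.filter_eq_nil_iff]
  intro c hc hcv
  exact pvUnseenNotMem h hv hc ((PySem.Set.contains_iff _ _).mp hcv)

theorem pvSeenData {comps lab mem} (h : pvInv comps lab mem) {v lv : Int}
    (hv : lab.get? v = some lv) :
    ∃ cv mv, mem.get? lv = some mv ∧ v ∈ mv ∧ cv ∈ comps ∧ v ∈ cv ∧
      ((↑cv : Multiset Int) = (↑mv : Multiset Int)) ∧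
      comps.filter (fun c => PySem.Set.contains c v) = [cv] := by
  obtain ⟨mv, hm, hvm⟩ := (h.labmem v lv).mp hv
  obtain ⟨cv, hcv, hce⟩ := pvPartToComp h hm
  have hvcv : v ∈ cv := by
    have : (v : Int) ∈ (↑cv : Multiset Int) := hce ▸ (by simpa using hvm)
    simpa using this
  refine ⟨cv, mv, hm, hvm, hcv, hvcv, hce, ?_⟩
  refine pvFilterSingleton (pvCompsNodup h) hcv ((PySem.Set.contains_iff _ _).mpr hvcv) ?_
  intro b hb hPb
  exact pvUniq h hb hcv ((PySem.Set.contains_iff _ _).mp hPb) hvcv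

-- B inserts a fresh singleton component for an unseen node
theorem pvAddNew {comps lab mem} (h : pvInv comps lab mem) (v : Int)
    (hv : lab.get? v = none) :
    pvInv (comps ++ [[v]]) (lab.insert v v) (mem.insert v [v]) := by
  have hmemv : mem.get? v = none := by
    cases hm : mem.get? v with
    | none => rfl
    | some m =>
      have := (h.labmem v v).mpr ⟨m, hm, h.keeper v m hm⟩
      rw [hv] at this
      cases this
  have hcont : mem.contains v = false := by
    rw [PySem.Dict.contains_eq_isSome_get?, hmemv]
    rfl
  refine ⟨?_, ?_, ?_, PySem.Dict.nodup_keys_insert _ _ _ h.keysN, ?_, ?_, ?_⟩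
  · intro c hc
    cases List.mem_append.mp hc with
    | inl h1 => exact h.nonempty c h1
    | inr h1 => simp at h1; simp [h1]
  · intro c hc
    cases List.mem_append.mp hc with
    | inl h1 => exact h.nodupC c h1
    | inr h1 => simp at h1; simp [h1]
  · rw [List.pairwise_append]
    refine ⟨h.disj, by simp, ?_⟩
    intro c hc d hd x hxc
    simp only [List.mem_singleton] at hd
    subst hd
    simp only [List.mem_singleton]
    intro hxv
    exact pvUnseenNotMem h hv hc (hxv ▸ hxc)
  · intro x l
    rw [PySem.Dict.get?_insert, PySem.Dict.get?_insert]
    by_cases hx : x = v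
    · rw [if_pos hx]
      constructor
      · intro he
        have hlv : l = v := by cases he; rfl
        rw [if_pos hlv]
        exact ⟨[v], rfl, by simp [hx]⟩
      · rintro ⟨m, hm, hxm⟩
        by_cases hl : l = v
        · rw [hl]
        · rw [if_neg hl] at hm
          have := (h.labmem x l).mpr ⟨m, hm, hxm⟩
          rw [hx, hv] at this
          cases this
    · rw [if_neg hx]
      constructor
      · intro he
        have hlv : l ≠ v := by
          intro hl
          obtain ⟨m, hm, hxm⟩ := (h.labmem x l).mp he
          rw [hl, hmemv] at hm
          cases hm
        rw [if_neg hlv]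
        exact (h.labmem x l).mp he
      · rintro ⟨m, hm, hxm⟩
        by_cases hl : l = v
        · rw [if_pos hl] at hm
          have : m = [v] := by cases hm; rfl
          rw [this] at hxm
          exact absurd (List.mem_singleton.mp hxm) hx
        · rw [if_neg hl] at hm
          exact (h.labmem x l).mpr ⟨m, hm, hxm⟩
  · intro l m
    rw [PySem.Dict.get?_insert]
    by_cases hl : l = v
    · rw [if_pos hl]
      intro hm
      have : m = [v] := by cases hm; rfl
      simp [this, hl]
    · rw [if_neg hl]
      exact h.keeper l m
  · have hitems : (mem.insert v [v]).items = mem.items ++ [(v, [v])] :=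
      PySem.Dict.items_insert_of_not_contains _ _ hcont
    have hvals : (mem.insert v [v]).values = mem.values ++ [[v]] := by
      simp [PySem.Dict.values, hitems]
    have hp := h.perm
    unfold pvM pvMV at hp ⊢
    rw [hvals, List.map_append, List.map_append, ← Multiset.coe_add, ← Multiset.coe_add, hp]

-- B's merge of the part keyed L into the part keyed K, against A's merged component list
theorem pvMerge (ca cb : List Int) (rest : List (List Int)) (lab : PySem.Dict Int Int)
    (mem : PySem.Dict Int (List Int)) (K L : Int) (mK mL : List Int)
    (h : pvInv (ca :: cb :: rest) lab mem)
    (hK : mem.get? K = some mK) (hL : mem.get? L = some mL) (hne : K ≠ L)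
    (hca : Multiset.ofList ca = Multiset.ofList mK)
    (hcb : Multiset.ofList cb = Multiset.ofList mL) :
    pvInv ((ca ++ cb) :: rest) (mL.foldl (fun d v => d.insert v K) lab)
        ((mem.modify K [] (fun xs => xs ++ mL)).erase L)
      ∧ ((mem.modify K [] (fun xs => xs ++ mL)).erase L).get? K = some (mK ++ mL) := by
  have hmod : mem.modify K [] (fun xs => xs ++ mL) = mem.insert K (mK ++ mL) := by
    unfold PySem.Dict.modify
    rw [PySem.Dict.getD_of_get?_eq_some _ _ hK]
  rw [hmod]
  have hG : ∀ x, ((mem.insert K (mK ++ mL)).erase L).get? x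
      = if x = L then none else if x = K then some (mK ++ mL) else mem.get? x := by
    intro x
    rw [pvGet?_erase]
    by_cases hx : x = L
    · simp [hx]
    · rw [if_neg hx, if_neg hx, PySem.Dict.get?_insert]
  have hgetK : ((mem.insert K (mK ++ mL)).erase L).get? K = some (mK ++ mL) := by
    rw [hG, if_neg hne, if_pos rfl]
  have hlabG := pvGet?_foldl_insert mL K lab
  obtain ⟨hca_r, hrest1⟩ := List.pairwise_cons.mp h.disj
  obtain ⟨hcb_r, hrestP⟩ := List.pairwise_cons.mp hrest1
  -- values bookkeeping
  have hVL := pvValues_perm mem L mL h.keysN hL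
  have hkNL : (mem.erase L).keys.Nodup := pvKeysNodup_erase _ _ h.keysN
  have hKL : (mem.erase L).get? K = some mK := by
    rw [pvGet?_erase, if_neg hne]
    exact hK
  have hVK := pvValues_perm _ K mK hkNL hKL
  have hswap : (mem.insert K (mK ++ mL)).erase L = (mem.erase L).insert K (mK ++ mL) :=
    pvErase_insert_ne _ _ _ _ hne
  have hkNL' : ((mem.erase L).insert K (mK ++ mL)).keys.Nodup :=
    PySem.Dict.nodup_keys_insert _ _ _ hkNL
  have hV' : ((mem.erase L).insert K (mK ++ mL)).values.Perm
      ((mK ++ mL) :: ((mem.erase L).erase K).values) := by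
    have h1 := pvValues_perm ((mem.erase L).insert K (mK ++ mL)) K (mK ++ mL) hkNL'
      (PySem.Dict.get?_insert_self _ _ _)
    rwa [pvErase_insert_self] at h1
  have hMVm : pvMV mem = Multiset.ofList mL ::ₘ Multiset.ofList mK
      ::ₘ Multiset.ofList (((mem.erase L).erase K).values.map (fun m => Multiset.ofList m)) := by
    unfold pvMV
    have hp : mem.values.Perm (mL :: mK :: ((mem.erase L).erase K).values) :=
      hVL.trans (hVK.cons mL)
    rw [Multiset.coe_eq_coe.mpr (hp.map (fun m => Multiset.ofList m))]
    rfl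
  have hMV' : pvMV ((mem.insert K (mK ++ mL)).erase L) = Multiset.ofList (mK ++ mL)
      ::ₘ Multiset.ofList (((mem.erase L).erase K).values.map (fun m => Multiset.ofList m)) := by
    rw [hswap]
    unfold pvMV
    rw [Multiset.coe_eq_coe.mpr (hV'.map (fun m => Multiset.ofList m))]
    rfl
  have hVeq : pvM rest
      = Multiset.ofList (((mem.erase L).erase K).values.map (fun m => Multiset.ofList m)) := by
    have hper := h.perm
    rw [pvM_cons, pvM_cons, hMVm, hca, hcb, Multiset.cons_swap] at hper
    exact (Multiset.cons_inj_right _).mp ((Multiset.cons_inj_right _).mp hper)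
  refine ⟨⟨?_, ?_, ?_, ?_, ?_, ?_, ?_⟩, hgetK⟩
  · intro c hc
    cases List.mem_cons.mp hc with
    | inl he =>
      have : ca ≠ [] := h.nonempty ca List.mem_cons_self
      cases hta : ca with
      | nil => exact absurd hta this
      | cons a t => simp [he, hta]
    | inr ht => exact h.nonempty c (List.mem_cons_of_mem _ (List.mem_cons_of_mem _ ht))
  · intro c hc
    cases List.mem_cons.mp hc with
    | inl he =>
      rw [he]
      exact List.Nodup.append (h.nodupC ca List.mem_cons_self)
        (h.nodupC cb (List.mem_cons_of_mem _ List.mem_cons_self))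
        (fun x hxa hxb => hca_r cb List.mem_cons_self x hxa hxb)
    | inr ht => exact h.nodupC c (List.mem_cons_of_mem _ (List.mem_cons_of_mem _ ht))
  · rw [List.pairwise_cons]
    refine ⟨?_, hrestP⟩
    intro r hr x hx
    cases List.mem_append.mp hx with
    | inl hxa => exact hca_r r (List.mem_cons_of_mem _ hr) x hxa
    | inr hxb => exact hcb_r r hr x hxb
  · exact pvKeysNodup_erase _ _ (PySem.Dict.nodup_keys_insert _ _ _ h.keysN)
  · intro v l
    rw [hlabG v, hG l]
    by_cases hvm : v ∈ mL
    · rw [if_pos hvm]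
      constructor
      · intro he
        have hl : K = l := Option.some.inj he
        rw [← hl, if_neg hne, if_pos rfl]
        exact ⟨mK ++ mL, rfl, List.mem_append.mpr (Or.inr hvm)⟩
      · rintro ⟨m, hm, hvm'⟩
        by_cases h1 : l = L
        · rw [if_pos h1] at hm
          cases hm
        · rw [if_neg h1] at hm
          by_cases h2 : l = K
          · rw [h2]
          · rw [if_neg h2] at hm
            exact absurd (pvBUniq h hm hL hvm' hvm) h1
    · rw [if_neg hvm]
      constructor
      · intro he
        have hlL : l ≠ L := by
          intro hl
          obtain ⟨m, hm, hvm2⟩ := (h.labmem v l).mp he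
          rw [hl, hL] at hm
          cases hm
          exact hvm hvm2
        rw [if_neg hlL]
        by_cases hlK : l = K
        · rw [if_pos hlK]
          obtain ⟨m, hm, hvm2⟩ := (h.labmem v l).mp he
          rw [hlK, hK] at hm
          cases hm
          exact ⟨mK ++ mL, rfl, List.mem_append.mpr (Or.inl hvm2)⟩
        · rw [if_neg hlK]
          exact (h.labmem v l).mp he
      · rintro ⟨m, hm, hvm'⟩
        by_cases h1 : l = L
        · rw [if_pos h1] at hm
          cases hm
        · rw [if_neg h1] at hm
          by_cases h2 : l = K
          · rw [if_pos h2] at hm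
            cases hm
            rw [h2]
            exact (h.labmem v K).mpr ⟨mK, hK, (List.mem_append.mp hvm').resolve_right hvm⟩
          · rw [if_neg h2] at hm
            exact (h.labmem v l).mpr ⟨m, hm, hvm'⟩
  · intro l m
    rw [hG l]
    by_cases h1 : l = L
    · rw [if_pos h1]
      intro hm
      cases hm
    · rw [if_neg h1]
      by_cases h2 : l = K
      · rw [if_pos h2]
        intro hm
        cases hm
        exact h2 ▸ List.mem_append.mpr (Or.inl (h.keeper K mK hK))
      · rw [if_neg h2]
        exact h.keeper l m
  · rw [pvM_cons, hMV', hVeq]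
    congr 1
    rw [← Multiset.coe_add, ← Multiset.coe_add, hca, hcb]

-- once the states are related and lf is a live key, the stop conditions agree
theorem pvCond_eq (nodes : List String) {comps : List (PySem.Set Int)}
    {lab : PySem.Dict Int Int} {mem : PySem.Dict Int (List Int)} {lf : Int} {mf : List Int}
    (h : pvInv comps lab mem) (hf : mem.get? lf = some mf) :
    pvCondA nodes comps = pvCondB nodes mem lf := by
  have hgd : mem.getD lf [] = mf := PySem.Dict.getD_of_get?_eq_some _ _ hf
  have hlen : comps.length = mem.size := by
    have hc := congrArg Multiset.card h.perm
    unfold pvM pvMV at hc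
    simpa [pvSize_eq_values_length] using hc
  unfold pvCondA pvCondB
  rw [hgd, hlen]
  by_cases h1 : mem.size = 1
  · have hv1 : mem.values.length = 1 := by
      rw [pvSize_eq_values_length] at h1
      exact h1
    obtain ⟨m0, hm0⟩ := List.length_eq_one_iff.mp hv1
    have hmf0 : mf = m0 := by
      have := pvMem_values_of_get? _ _ _ hf
      rw [hm0] at this
      exact List.mem_singleton.mp this
    have hc1 : comps.length = 1 := by rw [hlen]; exact h1
    obtain ⟨c0, hc0⟩ := List.length_eq_one_iff.mp hc1
    have hce : Multiset.ofList c0 = Multiset.ofList m0 := by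
      have hp := h.perm
      unfold pvM pvMV at hp
      rw [hc0, hm0] at hp
      simpa using hp
    have hlen0 : c0.length = mf.length := by
      have := congrArg Multiset.card hce
      simpa [hmf0] using this
    rw [hc0, hmf0]
    simp only [List.headD_cons]
    rw [hlen0, hmf0]
  · have hb : (mem.size == 1) = false := by simpa using h1
    rw [hb]
    simp

-- ---- A-side shape lemmas ----

theorem pvEqualRefl (c : List Int) : PySem.Set.equal c c = true :=
  (PySem.Set.equal_iff _ _).mpr (fun _ => Iff.rfl)

theorem pvAddToFirst_perm {comps : List (List Int)} {ci : List Int} {x : Int}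
    (hci : ci ∈ comps) (hx : x ∈ ci)
    (hu : ∀ c ∈ comps, x ∈ c → c = ci) (y : Int) :
    (pvAddToFirst comps x y).Perm (PySem.Set.add ci y :: comps.erase ci) := by
  induction comps with
  | nil => cases hci
  | cons c t ih =>
    by_cases hc : PySem.Set.contains c x = true
    · have hceq : c = ci := hu c List.mem_cons_self ((PySem.Set.contains_iff _ _).mp hc)
      simp only [pvAddToFirst, if_pos hc]
      rw [hceq, List.erase_cons_head]
    · have hcne : c ≠ ci := fun he => hc ((PySem.Set.contains_iff _ _).mpr (he ▸ hx))
      have hcit : ci ∈ t := (List.mem_cons.mp hci).resolve_left (fun he => hcne he.symm)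
      simp only [pvAddToFirst, if_neg hc]
      rw [List.erase_cons_tail (by simpa using hcne)]
      exact ((ih hcit (fun c' hc' hx' => hu c' (List.mem_cons_of_mem _ hc') hx')).cons c).trans
        (List.Perm.swap _ _ _)

theorem pvRemoveSet_eq_erase {comps : List (List Int)} {ci : List Int}
    (hu : ∀ b ∈ comps, PySem.Set.equal b ci = true → b = ci) :
    pvRemoveSet comps ci = comps.erase ci := by
  induction comps with
  | nil => rfl
  | cons c t ih =>
    by_cases hc : PySem.Set.equal c ci = true
    · have hceq : c = ci := hu c List.mem_cons_self hc
      unfold pvRemoveSet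
      simp only [List.eraseP_cons, hc, cond_true]
      rw [hceq, List.erase_cons_head]
    · have hcne : c ≠ ci := fun he => hc (he ▸ pvEqualRefl ci)
      unfold pvRemoveSet at ih ⊢
      simp only [List.eraseP_cons, Bool.eq_false_iff.mpr hc, cond_false]
      rw [List.erase_cons_tail (by simpa using hcne),
        ih (fun b hb hbe => hu b (List.mem_cons_of_mem _ hb) hbe)]

theorem pvM_append_singleton (l : List (List Int)) (c : List Int) :
    pvM (l ++ [c]) = pvM (c :: l) :=
  pvM_eq_of_perm List.perm_append_comm

theorem pvStep_sim (comps : List (PySem.Set Int)) (lab : PySem.Dict Int Int)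
    (mem : PySem.Dict Int (List Int)) (nodes : List String) (i j : Int)
    (h : pvInv comps lab mem) :
    pvInv (pvStepA comps i j) (pvStepB lab mem i j).1 (pvStepB lab mem i j).2.1 ∧
    pvCondA nodes (pvStepA comps i j) = pvCondB nodes (pvStepB lab mem i j).2.1 (pvStepB lab mem i j).2.2 := by
  cases hI : lab.get? i with
  | none =>
    have hciF : lab.contains i = false := by
      rw [PySem.Dict.contains_eq_isSome_get?, hI]; rfl
    cases hJ : lab.get? j with
    | none =>
      by_cases hij : i = j
      · -- both endpoints unseen and equal: a fresh singleton component
        rw [← hij] at hJ ⊢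
        have hInv1 := pvAddNew h i hI
        have hgi : (lab.insert i i).getD i 0 = i := by
          rw [PySem.Dict.getD_eq_get?_getD, PySem.Dict.get?_insert_self]; rfl
        have hcT : (lab.insert i i).contains i = true := by
          rw [PySem.Dict.contains_eq_isSome_get?, PySem.Dict.get?_insert_self]; rfl
        have hB : pvStepB lab mem i i = (lab.insert i i, mem.insert i [i], i) := by
          simp [pvStepB, pvSeen, hciF, hcT, hgi]
        have hA : pvStepA comps i i = comps ++ [PySem.Set.ofList [i, i]] := by
          simp only [pvStepA]
          rw [pvUnseenFilter h hI]
          simp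
        have hofl : PySem.Set.ofList [i, i] = [i] := by
          simp [PySem.Set.ofList, PySem.Set.add, PySem.Set.empty]
        rw [hA, hB, hofl]
        exact ⟨hInv1, pvCond_eq nodes hInv1 (PySem.Dict.get?_insert_self _ _ _)⟩
      · -- both endpoints unseen, distinct: fresh pair component
        have hInv1 := pvAddNew h i hI
        have hJ1 : (lab.insert i i).get? j = none := by
          rw [PySem.Dict.get?_insert_of_ne _ _ (fun he => hij he.symm)]; exact hJ
        have hInv2 := pvAddNew hInv1 j hJ1
        have hcjF : (lab.insert i i).contains j = false := by
          rw [PySem.Dict.contains_eq_isSome_get?, hJ1]; rfl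
        have hgi : ((lab.insert i i).insert j j).getD i 0 = i := by
          rw [PySem.Dict.getD_eq_get?_getD, PySem.Dict.get?_insert_of_ne _ _ hij,
            PySem.Dict.get?_insert_self]; rfl
        have hgj : ((lab.insert i i).insert j j).getD j 0 = j := by
          rw [PySem.Dict.getD_eq_get?_getD, PySem.Dict.get?_insert_self]; rfl
        have hmi : ((mem.insert i [i]).insert j [j]).get? i = some [i] := by
          rw [PySem.Dict.get?_insert_of_ne _ _ hij, PySem.Dict.get?_insert_self]
        have hmj : ((mem.insert i [i]).insert j [j]).get? j = some [j] :=
          PySem.Dict.get?_insert_self _ _ _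
        have hgmi : ((mem.insert i [i]).insert j [j]).getD i [] = [i] :=
          PySem.Dict.getD_of_get?_eq_some _ _ hmi
        have hgmj : ((mem.insert i [i]).insert j [j]).getD j [] = [j] :=
          PySem.Dict.getD_of_get?_eq_some _ _ hmj
        have hB : pvStepB lab mem i j =
            ([j].foldl (fun d v => d.insert v i) ((lab.insert i i).insert j j),
              ((((mem.insert i [i]).insert j [j]).modify i [] (fun xs => xs ++ [j])).erase j),
              i) := by
          simp [pvStepB, pvSeen, hciF, hcjF, hgi, hgj, hij, hgmi, hgmj]
        have hperm1 : pvM ((comps ++ [[i]]) ++ [[j]]) = pvM ([i] :: [j] :: comps) := by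
          refine pvM_eq_of_perm ?_
          have he : (comps ++ [[i]]) ++ [[j]] = comps ++ [[i], [j]] := by simp
          rw [he]
          exact List.perm_append_comm
        have hInv3 := pvInv_congr hperm1 hInv2
        obtain ⟨hInvM, hgetK⟩ := pvMerge [i] [j] comps _ _ i j [i] [j] hInv3 hmi hmj hij rfl rfl
        have hA : pvStepA comps i j = comps ++ [PySem.Set.ofList [i, j]] := by
          simp only [pvStepA]
          rw [pvUnseenFilter h hI, pvUnseenFilter h hJ]
          simp
        have hofl : PySem.Set.ofList [i, j] = [i] ++ [j] := by
          simp [PySem.Set.ofList, PySem.Set.add, PySem.Set.empty]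
          omega
        have hpermA : pvM (([i] ++ [j]) :: comps) = pvM (comps ++ [([i] ++ [j] : List Int)]) :=
          (pvM_append_singleton _ _).symm
        have hInvA := pvInv_congr hpermA hInvM
        rw [hA, hB, hofl]
        exact ⟨hInvA, pvCond_eq nodes hInvA hgetK⟩
    | some lj =>
      -- i unseen, j seen
      obtain ⟨cj, mj, hmj, hjMj, hcjC, hjCj, hcjE, hjFil⟩ := pvSeenData h hJ
      have hij : i ≠ j := fun he => by rw [he, hJ] at hI; cases hI
      have hljlab : lab.get? lj = some lj := (h.labmem lj lj).mpr ⟨mj, hmj, h.keeper lj mj hmj⟩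
      have hlji : lj ≠ i := fun he => by rw [he, hI] at hljlab; cases hljlab
      have hilj : i ≠ lj := fun he => hlji he.symm
      have hInv1 := pvAddNew h i hI
      have hcjT : (lab.insert i i).contains j = true := by
        rw [PySem.Dict.contains_eq_isSome_get?,
          PySem.Dict.get?_insert_of_ne _ _ (fun he => hij he.symm), hJ]; rfl
      have hgi : (lab.insert i i).getD i 0 = i := by
        rw [PySem.Dict.getD_eq_get?_getD, PySem.Dict.get?_insert_self]; rfl
      have hgj : (lab.insert i i).getD j 0 = lj := by
        rw [PySem.Dict.getD_eq_get?_getD,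
          PySem.Dict.get?_insert_of_ne _ _ (fun he => hij he.symm), hJ]; rfl
      have hm'i : (mem.insert i [i]).get? i = some [i] := PySem.Dict.get?_insert_self _ _ _
      have hm'j : (mem.insert i [i]).get? lj = some mj := by
        rw [PySem.Dict.get?_insert_of_ne _ _ hlji]; exact hmj
      have hgmi : (mem.insert i [i]).getD i [] = [i] :=
        PySem.Dict.getD_of_get?_eq_some _ _ hm'i
      have hgmj : (mem.insert i [i]).getD lj [] = mj :=
        PySem.Dict.getD_of_get?_eq_some _ _ hm'j
      have hiNot : ∀ c ∈ comps, i ∉ c := fun c hc => pvUnseenNotMem h hI hc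
      have hA : pvStepA comps i j = pvAddToFirst comps j i := by
        simp only [pvStepA]
        rw [pvUnseenFilter h hI, hjFil]
        simp
      have hAp : (pvAddToFirst comps j i).Perm (PySem.Set.add cj i :: comps.erase cj) :=
        pvAddToFirst_perm hcjC hjCj (fun c hc hxc => pvUniq h hc hcjC hxc hjCj) i
      have hAdd : PySem.Set.add cj i = cj ++ [i] := PySem.Set.add_of_not_mem (hiNot cj hcjC)
      by_cases hsz : (1 : Nat) < mj.length
      · -- B keeps j's label
        have hB : pvStepB lab mem i j =
            ([i].foldl (fun d v => d.insert v lj) (lab.insert i i),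
              (((mem.insert i [i]).modify lj [] (fun xs => xs ++ [i])).erase i), lj) := by
          simp [pvStepB, pvSeen, hciF, hcjT, hgi, hgj, hilj, hgmi, hgmj, hsz]
        have hpermC : pvM (comps ++ [[i]]) = pvM (cj :: [i] :: comps.erase cj) := by
          refine pvM_eq_of_perm ?_
          have h1 : comps.Perm (cj :: comps.erase cj) := List.perm_cons_erase hcjC
          exact (List.perm_append_comm).trans ((h1.cons _).trans (List.Perm.swap _ _ _))
        have hInv2 := pvInv_congr hpermC hInv1
        obtain ⟨hInvM, hgetK⟩ :=
          pvMerge cj [i] (comps.erase cj) _ _ lj i mj [i] hInv2 hm'j hm'i hlji hcjE rfl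
        have hpermA : pvM ((cj ++ [i]) :: comps.erase cj) = pvM (pvAddToFirst comps j i) := by
          refine pvM_eq_of_perm ?_
          rw [← hAdd]
          exact hAp.symm
        have hInvA := pvInv_congr hpermA hInvM
        rw [hA, hB]
        exact ⟨hInvA, pvCond_eq nodes hInvA hgetK⟩
      · -- B keeps i's fresh label
        have hB : pvStepB lab mem i j =
            (mj.foldl (fun d v => d.insert v i) (lab.insert i i),
              (((mem.insert i [i]).modify i [] (fun xs => xs ++ mj)).erase lj), i) := by
          simp [pvStepB, pvSeen, hciF, hcjT, hgi, hgj, hilj, hgmi, hgmj, hsz]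
        have hpermC2 : pvM (comps ++ [[i]]) = pvM ([i] :: cj :: comps.erase cj) := by
          refine pvM_eq_of_perm ?_
          have h1 : comps.Perm (cj :: comps.erase cj) := List.perm_cons_erase hcjC
          exact (List.perm_append_comm).trans (h1.cons _)
        have hInv2 := pvInv_congr hpermC2 hInv1
        obtain ⟨hInvM, hgetK⟩ :=
          pvMerge [i] cj (comps.erase cj) _ _ i lj [i] mj hInv2 hm'i hm'j hilj rfl hcjE
        have hpermA : pvM (([i] ++ cj) :: comps.erase cj) = pvM (pvAddToFirst comps j i) := by
          have h2 : pvM (([i] ++ cj) :: comps.erase cj) = pvM ((cj ++ [i]) :: comps.erase cj) := by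
            rw [pvM_cons, pvM_cons]
            congr 1
            exact Multiset.coe_eq_coe.mpr List.perm_append_comm
          rw [h2]
          refine pvM_eq_of_perm ?_
          rw [← hAdd]
          exact hAp.symm
        have hInvA := pvInv_congr hpermA hInvM
        rw [hA, hB]
        exact ⟨hInvA, pvCond_eq nodes hInvA hgetK⟩
  | some li =>
    have hciT : lab.contains i = true := by
      rw [PySem.Dict.contains_eq_isSome_get?, hI]; rfl
    obtain ⟨ci, mi, hmi, hiMi, hciC, hiCi, hciE, hiFil⟩ := pvSeenData h hI
    cases hJ : lab.get? j with
    | none =>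
      -- i seen, j unseen
      have hij : i ≠ j := fun he => by rw [he, hJ] at hI; cases hI
      have hlilab : lab.get? li = some li := (h.labmem li li).mpr ⟨mi, hmi, h.keeper li mi hmi⟩
      have hlij : li ≠ j := fun he => by rw [he, hJ] at hlilab; cases hlilab
      have hcjF2 : lab.contains j = false := by
        rw [PySem.Dict.contains_eq_isSome_get?, hJ]; rfl
      have hInv1 := pvAddNew h j hJ
      have hgi : (lab.insert j j).getD i 0 = li := by
        rw [PySem.Dict.getD_eq_get?_getD, PySem.Dict.get?_insert_of_ne _ _ hij, hI]; rfl
      have hgj : (lab.insert j j).getD j 0 = j := by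
        rw [PySem.Dict.getD_eq_get?_getD, PySem.Dict.get?_insert_self]; rfl
      have hm'i : (mem.insert j [j]).get? li = some mi := by
        rw [PySem.Dict.get?_insert_of_ne _ _ hlij]; exact hmi
      have hm'j : (mem.insert j [j]).get? j = some [j] := PySem.Dict.get?_insert_self _ _ _
      have hgmi : (mem.insert j [j]).getD li [] = mi :=
        PySem.Dict.getD_of_get?_eq_some _ _ hm'i
      have hgmj : (mem.insert j [j]).getD j [] = [j] :=
        PySem.Dict.getD_of_get?_eq_some _ _ hm'j
      have hminz : ¬ (mi.length < 1) := by
        have h0 : 0 < mi.length := List.length_pos_of_mem hiMi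
        omega
      have hB : pvStepB lab mem i j =
          ([j].foldl (fun d v => d.insert v li) (lab.insert j j),
            (((mem.insert j [j]).modify li [] (fun xs => xs ++ [j])).erase j), li) := by
        simp [pvStepB, pvSeen, hciT, hcjF2, hgi, hgj, hlij, hgmi, hgmj, hminz]
      have hjNot : ∀ c ∈ comps, j ∉ c := fun c hc => pvUnseenNotMem h hJ hc
      have hA : pvStepA comps i j = pvAddToFirst comps i j := by
        simp only [pvStepA]
        rw [hiFil, pvUnseenFilter h hJ]
        simp
      have hAp : (pvAddToFirst comps i j).Perm (PySem.Set.add ci j :: comps.erase ci) :=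
        pvAddToFirst_perm hciC hiCi (fun c hc hxc => pvUniq h hc hciC hxc hiCi) j
      have hAdd : PySem.Set.add ci j = ci ++ [j] := PySem.Set.add_of_not_mem (hjNot ci hciC)
      have hpermC : pvM (comps ++ [[j]]) = pvM (ci :: [j] :: comps.erase ci) := by
        refine pvM_eq_of_perm ?_
        have h1 : comps.Perm (ci :: comps.erase ci) := List.perm_cons_erase hciC
        exact (List.perm_append_comm).trans ((h1.cons _).trans (List.Perm.swap _ _ _))
      have hInv2 := pvInv_congr hpermC hInv1
      obtain ⟨hInvM, hgetK⟩ :=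
        pvMerge ci [j] (comps.erase ci) _ _ li j mi [j] hInv2 hm'i hm'j hlij hciE rfl
      have hpermA : pvM ((ci ++ [j]) :: comps.erase ci) = pvM (pvAddToFirst comps i j) := by
        refine pvM_eq_of_perm ?_
        rw [← hAdd]
        exact hAp.symm
      have hInvA := pvInv_congr hpermA hInvM
      rw [hA, hB]
      exact ⟨hInvA, pvCond_eq nodes hInvA hgetK⟩
    | some lj =>
      -- both seen
      obtain ⟨cj, mj, hmj, hjMj, hcjC, hjCj, hcjE, hjFil⟩ := pvSeenData h hJ
      have hcjT : lab.contains j = true := by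
        rw [PySem.Dict.contains_eq_isSome_get?, hJ]; rfl
      have hgdi : lab.getD i 0 = li := PySem.Dict.getD_of_get?_eq_some _ _ hI
      have hgdj : lab.getD j 0 = lj := PySem.Dict.getD_of_get?_eq_some _ _ hJ
      have hgmi : mem.getD li [] = mi := PySem.Dict.getD_of_get?_eq_some _ _ hmi
      have hgmj : mem.getD lj [] = mj := PySem.Dict.getD_of_get?_eq_some _ _ hmj
      by_cases hll : li = lj
      · -- same component: both sides do nothing
        have hmm : mi = mj := by
          rw [hll, hmj] at hmi
          exact (Option.some.inj hmi).symm
        have hjci : j ∈ ci := by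
          have h1 : (j : Int) ∈ Multiset.ofList mj := by simpa using hjMj
          have h2 : (j : Int) ∈ Multiset.ofList ci := by rw [hciE, hmm]; exact h1
          simpa using h2
        have hcicj : ci = cj := pvUniq h hciC hcjC hjci hjCj
        have hEq : PySem.Set.equal ci cj = true := by rw [hcicj]; exact pvEqualRefl cj
        have hA : pvStepA comps i j = comps := by
          simp only [pvStepA]
          rw [hiFil, hjFil]
          simp [pvSetEqList, hEq]
        have hB : pvStepB lab mem i j = (lab, mem, li) := by
          simp [pvStepB, pvSeen, hciT, hcjT, hgdi, hgdj, hll]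
        rw [hA, hB]
        exact ⟨h, pvCond_eq nodes h hmi⟩
      · -- different components: union on both sides
        have hSEf : PySem.Set.equal ci cj = false := by
          rcases Bool.eq_false_or_eq_true (PySem.Set.equal ci cj) with hq | hq
          swap
          · exact hq
          · exfalso
            have hjci : j ∈ ci := ((PySem.Set.equal_iff _ _).mp hq j).mpr hjCj
            have hcicj : ci = cj := pvUniq h hciC hcjC hjci hjCj
            have himj : i ∈ mj := by
              have h1 : (i : Int) ∈ Multiset.ofList ci := by simpa using hiCi
              rw [hcicj, hcjE] at h1
              simpa using h1
            exact hll (pvBUniq h hmi hmj hiMi himj)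
        have hcine : ci ≠ cj := fun he => by rw [he, pvEqualRefl cj] at hSEf; cases hSEf
        have hu1 : ∀ b ∈ comps, PySem.Set.equal b ci = true → b = ci := by
          intro b hb hbe
          exact pvUniq h hb hciC (((PySem.Set.equal_iff _ _).mp hbe i).mpr hiCi) hiCi
        have hrm1 : pvRemoveSet comps ci = comps.erase ci := pvRemoveSet_eq_erase hu1
        have hcjE2 : cj ∈ comps.erase ci :=
          (List.Nodup.mem_erase_iff (pvCompsNodup h)).mpr ⟨fun he => hcine he.symm, hcjC⟩
        have hu2 : ∀ b ∈ comps.erase ci, PySem.Set.equal b cj = true → b = cj := by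
          intro b hb hbe
          exact pvUniq h (List.mem_of_mem_erase hb) hcjC
            (((PySem.Set.equal_iff _ _).mp hbe j).mpr hjCj) hjCj
        have hrm2 : pvRemoveSet (comps.erase ci) cj = (comps.erase ci).erase cj :=
          pvRemoveSet_eq_erase hu2
        have hdisjU : ∀ x ∈ cj, x ∉ ci := by
          intro x hxj hxi
          exact hcine (pvUniq h hciC hcjC hxi hxj)
        have hU : PySem.Set.union ci cj = ci ++ cj := by
          unfold PySem.Set.union
          exact PySem.Set.update_eq_append_of_disjoint ci cj (h.nodupC cj hcjC) hdisjU
        have hA : pvStepA comps i j = ((comps.erase ci).erase cj) ++ [ci ++ cj] := by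
          simp only [pvStepA]
          rw [hiFil, hjFil]
          simp [pvSetEqList, hSEf, hrm1, hrm2, hU]
        have hrest : comps.Perm (ci :: cj :: (comps.erase ci).erase cj) := by
          have h1 : comps.Perm (ci :: comps.erase ci) := List.perm_cons_erase hciC
          have h2 : (comps.erase ci).Perm (cj :: (comps.erase ci).erase cj) :=
            List.perm_cons_erase hcjE2
          exact h1.trans (h2.cons ci)
        have hljli : lj ≠ li := fun he => hll he.symm
        by_cases hsz : mi.length < mj.length
        · -- B keeps j's label
          have hB : pvStepB lab mem i j =
              (mi.foldl (fun d v => d.insert v lj) lab,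
                ((mem.modify lj [] (fun xs => xs ++ mi)).erase li), lj) := by
            simp [pvStepB, pvSeen, hciT, hcjT, hgdi, hgdj, hll, hgmi, hgmj, hsz]
          have hInv2 := pvInv_congr (pvM_eq_of_perm (hrest.trans (List.Perm.swap _ _ _))) h
          obtain ⟨hInvM, hgetK⟩ :=
            pvMerge cj ci ((comps.erase ci).erase cj) _ _ lj li mj mi hInv2 hmj hmi hljli hcjE hciE
          have hpermA : pvM ((cj ++ ci) :: (comps.erase ci).erase cj)
              = pvM (((comps.erase ci).erase cj) ++ [ci ++ cj]) := by
            rw [pvM_append_singleton, pvM_cons, pvM_cons]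
            congr 1
            exact Multiset.coe_eq_coe.mpr List.perm_append_comm
          have hInvA := pvInv_congr hpermA hInvM
          rw [hA, hB]
          exact ⟨hInvA, pvCond_eq nodes hInvA hgetK⟩
        · -- B keeps i's label
          have hB : pvStepB lab mem i j =
              (mj.foldl (fun d v => d.insert v li) lab,
                ((mem.modify li [] (fun xs => xs ++ mj)).erase lj), li) := by
            simp [pvStepB, pvSeen, hciT, hcjT, hgdi, hgdj, hll, hgmi, hgmj, hsz]
          have hInv2 := pvInv_congr (pvM_eq_of_perm hrest) h
          obtain ⟨hInvM, hgetK⟩ :=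
            pvMerge ci cj ((comps.erase ci).erase cj) _ _ li lj mi mj hInv2 hmi hmj hll hciE hcjE
          have hpermA : pvM ((ci ++ cj) :: (comps.erase ci).erase cj)
              = pvM (((comps.erase ci).erase cj) ++ [ci ++ cj]) :=
            (pvM_append_singleton _ _).symm
          have hInvA := pvInv_congr hpermA hInvM
          rw [hA, hB]
          exact ⟨hInvA, pvCond_eq nodes hInvA hgetK⟩

theorem pvGo_sim (nodes : List String) (edges : List (Int × Int × Int))
    (comps : List (PySem.Set Int)) (lab : PySem.Dict Int Int) (mem : PySem.Dict Int (List Int))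
    (h : pvInv comps lab mem) :
    pvGoA nodes comps edges = pvGoB nodes lab mem edges := by
  induction edges generalizing comps lab mem with
  | nil => rfl
  | cons e rest ih =>
    obtain ⟨w, i, j⟩ := e
    obtain ⟨hinv, hcond⟩ := pvStep_sim comps lab mem nodes i j h
    simp only [pvGoA, pvGoB, hcond]
    split
    · rfl
    · exact ih _ _ _ hinv

theorem pvInv_init : pvInv [] PySem.Dict.empty PySem.Dict.empty := by
  refine ⟨by simp, by simp, by simp, ?_, ?_, ?_, ?_⟩
  · show (PySem.Dict.mk ([] : List (Int × List Int))).keys.Nodup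
    simp [PySem.Dict.keys]
  · intro v l
    constructor
    · intro hg
      simp [PySem.Dict.empty, PySem.Dict.get?] at hg
    · rintro ⟨m, hm, _⟩
      simp [PySem.Dict.empty, PySem.Dict.get?] at hm
  · intro l m hm
    simp [PySem.Dict.empty, PySem.Dict.get?] at hm
  · simp [pvM, pvMV, PySem.Dict.empty, PySem.Dict.values]

-- ===== VERDICT (by name: the statement is the Claim_ definition above) =====
theorem connectAll_spec : Claim_equal_connectAll := by
  intro nodes edges _ _
  unfold Spec_connectAll connectAll connectAll_alt
  exact pvGo_sim nodes edges [] _ _ pvInv_init
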